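-- pv_equiv track=rewrite | github.com/gfrangiamone/audiobook-maker | epub_to_tts.py | _body_has_skip_type
-- ===== SOURCE A (Python) =====
-- EPUB_TYPES_TO_SKIP = {
--     # Note
--     "footnote", "footnotes", "endnote", "endnotes", "noteref",
--     "annotation", "rearnote", "rearnotes",
--     # Apparato critico
--     "bibliography", "biblioentry", "glossary", "glossterm", "glossdef",
--     "index", "index-headnotes", "index-group", "index-entry",
--     "index-term", "index-locator",
--     # Front/back matter non narrativo
--     "toc", "landmarks", "lot", "loi", "loa",  # list of tables/illustrations/audio
--     "colophon", "imprint", "copyright-page",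
--     "errata", "appendix",
--     # Riferimenti editoriali
--     "contributors", "other-credits", "acknowledgments",
-- }
--
-- def _body_has_skip_type(html_content: str) -> bool:
--     """Controlla se il <body> o <section> principale ha epub:type non-audio."""
--     # Fast check senza parsing completo — cerca nell'header del documento
--     head = html_content[:2000].lower()
--     for etype in EPUB_TYPES_TO_SKIP:
--         if f'epub:type="{etype}"' in head or f"epub:type='{etype}'" in head:
--             return True
--         if f'epub:type="{etype} ' in head or f"epub:type='{etype} " in head:
--             return True
--     return False
-- ===== SOURCE B (Python) =====
-- EPUB_TYPES_TO_SKIP = {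
--     "footnote", "footnotes", "endnote", "endnotes", "noteref",
--     "annotation", "rearnote", "rearnotes",
--     "bibliography", "biblioentry", "glossary", "glossterm", "glossdef",
--     "index", "index-headnotes", "index-group", "index-entry",
--     "index-term", "index-locator",
--     "toc", "landmarks", "lot", "loi", "loa",
--     "colophon", "imprint", "copyright-page",
--     "errata", "appendix",
--     "contributors", "other-credits", "acknowledgments",
-- }
--
--
-- def _token_after(head, j):
--     """If head[j] is a quote char, return the token running from head[j+1] up to
--     the first space or matching quote; None if neither terminator occurs."""
--     if j < len(head) and head[j] in ('"', "'"):
--         q = head[j]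
--         k = j + 1
--         while k < len(head) and head[k] != ' ' and head[k] != q:
--             k += 1
--         if k < len(head):
--             return head[j + 1:k]
--     return None
--
--
-- def _body_has_skip_type(html_content: str) -> bool:
--     """Single parse pass: visit each 'epub:type=' occurrence in the 2000-char
--     lowercased head, extract the quoted token and look it up in the set, instead
--     of scanning the head once per skip type."""
--     head = html_content[:2000].lower()
--     i = head.find('epub:type=')
--     while i != -1:
--         token = _token_after(head, i + 10)
--         if token is not None and token in EPUB_TYPES_TO_SKIP:
--             return True
--         i = head.find('epub:type=', i + 1)
--     return False
-- ===== Notes on version B (the rewrite author's own statement) =====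
-- stated objective: alternative
-- what changed: Instead of scanning the 2000-char head once per skip type with four formatted substring tests (33 types x 4 patterns), B makes a single pass over the occurrences of the attribute marker, parses the quoted token up to the first space or matching quote, and looks it up in the set.
import Mathlib
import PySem

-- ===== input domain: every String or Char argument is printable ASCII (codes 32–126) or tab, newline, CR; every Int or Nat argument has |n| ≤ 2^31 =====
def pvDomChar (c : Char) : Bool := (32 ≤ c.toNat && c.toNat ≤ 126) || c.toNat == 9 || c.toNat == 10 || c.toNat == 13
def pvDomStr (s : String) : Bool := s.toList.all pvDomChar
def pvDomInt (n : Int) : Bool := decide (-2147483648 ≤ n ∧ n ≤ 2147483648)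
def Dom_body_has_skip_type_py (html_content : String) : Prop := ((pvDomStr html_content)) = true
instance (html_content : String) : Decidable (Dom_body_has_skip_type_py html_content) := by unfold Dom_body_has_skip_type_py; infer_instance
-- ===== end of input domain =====

-- B replaces A's per-skip-type repeated substring scan with a single parse pass over the
-- 'epub:type=' attribute occurrences plus a set lookup of the quoted token (objective: alternative).

-- ===== PORT A =====
-- Python's EPUB_TYPES_TO_SKIP set literal, in source order (A only tests membership /
-- iterates to an existential 'return True', so iteration order does not affect the result).
def pvSkipTypes : List String :=
  ["footnote", "footnotes", "endnote", "endnotes", "noteref",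
   "annotation", "rearnote", "rearnotes",
   "bibliography", "biblioentry", "glossary", "glossterm", "glossdef",
   "index", "index-headnotes", "index-group", "index-entry",
   "index-term", "index-locator",
   "toc", "landmarks", "lot", "loi", "loa",
   "colophon", "imprint", "copyright-page",
   "errata", "appendix",
   "contributors", "other-credits", "acknowledgments"]

-- the literal 'epub:type=' (10 chars)
def pvMarker : List Char := ['e', 'p', 'u', 'b', ':', 't', 'y', 'p', 'e', '=']

-- A: head = html_content[:2000].lower(); for each etype, test the four f-string patterns with
-- 'in' (early 'return True' = List.any).
def body_has_skip_type_py (html_content : String) : Bool :=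
  let head := PySem.Chars.lower (PySem.List.slice html_content.toList none (some 2000))
  pvSkipTypes.any fun e =>
    (PySem.Chars.isIn (pvMarker ++ '"' :: e.toList ++ ['"']) head ||
     PySem.Chars.isIn (pvMarker ++ '\'' :: e.toList ++ ['\'']) head) ||
    (PySem.Chars.isIn (pvMarker ++ '"' :: e.toList ++ [' ']) head ||
     PySem.Chars.isIn (pvMarker ++ '\'' :: e.toList ++ [' ']) head)

-- ===== PORT B =====
-- Source B's _token_after(head, j), on the suffix of head starting at index j: if it starts with a
-- quote, the token up to the first space or matching quote — provided that terminator exists.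
def pvTokenAfter? (cs : List Char) : Option (List Char) :=
  match cs with
  | q :: after =>
    if q == '"' || q == '\'' then
      match after.dropWhile (fun c => !(c == ' ') && !(c == q)) with
      | [] => none                                   -- k reached len(head): no terminator
      | _ :: _ => some (after.takeWhile (fun c => !(c == ' ') && !(c == q)))
    else none
  | [] => none

-- the loop body at one candidate position: marker here, and its token is a skip type
def pvHit (cs : List Char) : Bool :=
  pvMarker.isPrefixOf cs &&
    (match pvTokenAfter? (cs.drop 10) with
     | some tok => pvSkipTypes.contains (String.ofList tok)
     | none => false)

-- Source B's find-loop: 'i = head.find(marker); while i != -1: …; i = head.find(marker, i+1)'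
-- rendered as the structural scan over suffixes (it visits exactly the marker occurrences,
-- in the same left-to-right order; positions without the marker contribute false).
def pvScan : List Char → Bool
  | [] => false
  | c :: rest => pvHit (c :: rest) || pvScan rest

def body_has_skip_type_py_alt (html_content : String) : Bool :=
  let head := PySem.Chars.lower (PySem.List.slice html_content.toList none (some 2000))
  pvScan head

-- ===== PRECONDITION & SPEC =====
def Spec_body_has_skip_type_py (html_content : String) (out : Bool) : Prop := out = body_has_skip_type_py_alt html_content
instance (html_content : String) (out : Bool) : Decidable (Spec_body_has_skip_type_py html_content out) := by unfold Spec_body_has_skip_type_py; infer_instance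

-- ===== CLAIM (what is proved, stated in full; the proofs are below) =====
def Claim_equal_body_has_skip_type_py : Prop := ∀ (html_content : String), Dom_body_has_skip_type_py html_content → Spec_body_has_skip_type_py html_content (body_has_skip_type_py html_content)

-- ===== LEMMAS AND PROOFS =====

-- the common shape of A's four patterns
def pvPat (q : Char) (e : String) (t : Char) : List Char := pvMarker ++ q :: e.toList ++ [t]

-- a position matches in B's sense
def pvP (s : List Char) : Prop :=
  ∃ e ∈ pvSkipTypes, ∃ q t : Char, (q = '"' ∨ q = '\'') ∧ (t = q ∨ t = ' ') ∧ pvPat q e t <+: s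

-- no skip-type name contains a space or either quote character
lemma pvTypes_clean :
    (pvSkipTypes.all fun e => e.toList.all fun c => !(c == ' ') && !(c == '"') && !(c == '\'')) = true := by
  decide

lemma dropWhile_head_false {p : Char → Bool} {l : List Char} {t : Char} {r : List Char}
    (h : l.dropWhile p = t :: r) : p t = false := by
  induction l with
  | nil => simp [List.dropWhile_nil] at h
  | cons a as ih =>
    by_cases ha : p a = true
    · exact ih (by rwa [List.dropWhile_cons, if_pos ha] at h)
    · rw [List.dropWhile_cons, if_neg ha] at h
      injection h with h1 _
      subst h1
      simpa using ha

lemma takeWhile_middle {p : Char → Bool} (xs : List Char) {t : Char} (r : List Char)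
    (hx : ∀ c ∈ xs, p c = true) (ht : p t = false) :
    (xs ++ t :: r).takeWhile p = xs := by
  induction xs with
  | nil => simp [ht]
  | cons a as ih =>
    simp only [List.cons_append, List.takeWhile_cons, hx a (by simp)]
    simp [ih (fun c hc => hx c (by simp [hc]))]

lemma dropWhile_middle {p : Char → Bool} (xs : List Char) {t : Char} (r : List Char)
    (hx : ∀ c ∈ xs, p c = true) (ht : p t = false) :
    (xs ++ t :: r).dropWhile p = t :: r := by
  induction xs with
  | nil => simp [ht]
  | cons a as ih =>
    simp only [List.cons_append, List.dropWhile_cons, hx a (by simp)]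
    simp [ih (fun c hc => hx c (by simp [hc]))]

lemma pvTypes_clean' {e : String} (he : e ∈ pvSkipTypes) {c : Char} (hc : c ∈ e.toList)
    {q : Char} (hq : q = '"' ∨ q = '\'') : (!(c == ' ') && !(c == q)) = true := by
  have h1 := List.all_eq_true.mp pvTypes_clean e he
  have h2 := List.all_eq_true.mp h1 c hc
  rcases hq with rfl | rfl <;> simp_all

lemma pvHit_iff (s : List Char) : pvHit s = true ↔ pvP s := by
  constructor
  · intro h
    simp only [pvHit, Bool.and_eq_true] at h
    obtain ⟨hpre, hmatch⟩ := h
    obtain ⟨u, hu⟩ := List.isPrefixOf_iff_prefix.mp hpre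
    have hdrop : s.drop 10 = u := by rw [← hu]; simp [pvMarker]
    rw [hdrop] at hmatch
    match hu' : u with
    | [] => simp [pvTokenAfter?] at hmatch
    | q :: after =>
      by_cases hq : (q == '"' || q == '\'') = true
      · simp only [pvTokenAfter?, if_pos hq] at hmatch
        match hdw : after.dropWhile (fun c => !(c == ' ') && !(c == q)) with
        | [] => rw [hdw] at hmatch; simp only at hmatch; exact absurd hmatch (by simp)
        | t :: r =>
          rw [hdw] at hmatch
          simp only at hmatch
          have hcont := List.contains_iff_mem.mp hmatch
          have hsplit : after = after.takeWhile (fun c => !(c == ' ') && !(c == q)) ++ t :: r := by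
            rw [← hdw, List.takeWhile_append_dropWhile]
          have hpt := dropWhile_head_false hdw
          have ht : t = q ∨ t = ' ' := by
            simp only [Bool.and_eq_false_iff, Bool.not_eq_false', beq_iff_eq] at hpt
            tauto
          have hq' : q = '"' ∨ q = '\'' := by
            simp only [Bool.or_eq_true, beq_iff_eq] at hq; exact hq
          unfold pvP
          refine ⟨String.ofList (after.takeWhile (fun c => !(c == ' ') && !(c == q))), hcont,
            q, t, hq', ht, r, ?_⟩
          rw [← hu, hsplit]
          simp only [pvPat, String.toList_ofList, List.append_assoc, List.cons_append,
            List.nil_append]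
          rw [takeWhile_middle _ r (fun c hc => List.mem_takeWhile_imp hc) hpt]
      · simp [pvTokenAfter?, hq] at hmatch
  · intro hp
    unfold pvP at hp
    obtain ⟨e, he, q, t, hq, ht, r, hpat⟩ := hp
    have hs : s = pvMarker ++ q :: (e.toList ++ t :: r) := by
      rw [← hpat]; simp [pvPat]
    have hx : ∀ c ∈ e.toList, (!(c == ' ') && !(c == q)) = true :=
      fun c hc => pvTypes_clean' he hc hq
    have hpt : (!(t == ' ') && !(t == q)) = false := by
      rcases ht with rfl | rfl <;> simp
    have hdrop : s.drop 10 = q :: (e.toList ++ t :: r) := by rw [hs]; simp [pvMarker]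
    have hqb : (q == '"' || q == '\'') = true := by
      rcases hq with rfl | rfl <;> decide
    simp only [pvHit, hdrop, pvTokenAfter?, if_pos hqb,
      dropWhile_middle e.toList r hx hpt, takeWhile_middle e.toList r hx hpt,
      Bool.and_eq_true]
    refine ⟨List.isPrefixOf_iff_prefix.mpr ⟨q :: (e.toList ++ t :: r), hs.symm⟩, ?_⟩
    rw [String.ofList_toList]
    exact List.contains_iff_mem.mpr he

lemma pvScan_iff (cs : List Char) : pvScan cs = true ↔ ∃ j, pvHit (cs.drop j) = true := by
  induction cs with
  | nil => simp [pvScan, pvHit, pvMarker]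
  | cons c rest ih =>
    simp only [pvScan, Bool.or_eq_true, ih]
    constructor
    · rintro (h | ⟨j, hj⟩)
      · exact ⟨0, h⟩
      · exact ⟨j + 1, hj⟩
    · rintro ⟨j, hj⟩
      cases j with
      | zero => exact Or.inl hj
      | succ k => exact Or.inr ⟨k, hj⟩

lemma pvA_iff (head : List Char) :
    (pvSkipTypes.any fun e =>
      (PySem.Chars.isIn (pvMarker ++ '"' :: e.toList ++ ['"']) head ||
       PySem.Chars.isIn (pvMarker ++ '\'' :: e.toList ++ ['\'']) head) ||
      (PySem.Chars.isIn (pvMarker ++ '"' :: e.toList ++ [' ']) head ||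
       PySem.Chars.isIn (pvMarker ++ '\'' :: e.toList ++ [' ']) head)) = true
    ↔ ∃ j, pvP (head.drop j) := by
  rw [List.any_eq_true]
  unfold pvP
  constructor
  · rintro ⟨e, he, hp⟩
    simp only [Bool.or_eq_true, ← PySem.Chars.exists_prefix_drop_iff_isIn] at hp
    rcases hp with ((⟨j, h⟩ | ⟨j, h⟩) | (⟨j, h⟩ | ⟨j, h⟩))
    · exact ⟨j, e, he, '"', '"', Or.inl rfl, Or.inl rfl, h⟩
    · exact ⟨j, e, he, '\'', '\'', Or.inr rfl, Or.inl rfl, h⟩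
    · exact ⟨j, e, he, '"', ' ', Or.inl rfl, Or.inr rfl, h⟩
    · exact ⟨j, e, he, '\'', ' ', Or.inr rfl, Or.inr rfl, h⟩
  · rintro ⟨j, e, he, q, t, hq, ht, hpre⟩
    refine ⟨e, he, ?_⟩
    simp only [Bool.or_eq_true, ← PySem.Chars.exists_prefix_drop_iff_isIn]
    simp only [pvPat] at hpre
    rcases hq with rfl | rfl <;> rcases ht with rfl | rfl
    · exact Or.inl (Or.inl ⟨j, hpre⟩)
    · exact Or.inr (Or.inl ⟨j, hpre⟩)
    · exact Or.inl (Or.inr ⟨j, hpre⟩)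
    · exact Or.inr (Or.inr ⟨j, hpre⟩)

-- ===== VERDICT (by name: the statement is the Claim_ definition above) =====
theorem body_has_skip_type_py_spec : Claim_equal_body_has_skip_type_py := by
  intro html _
  unfold Spec_body_has_skip_type_py body_has_skip_type_py body_has_skip_type_py_alt
  rw [Bool.eq_iff_iff, pvA_iff, pvScan_iff]
  exact exists_congr fun j => (pvHit_iff _).symm
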